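-- pv_equiv track=rewrite | github.com/bdefnet-personal/Advent-of-Code | 2024/Day_24/solution.py | get_numbers_to_add
-- ===== SOURCE A (Python) =====
-- def get_numbers_to_add(inputs):
--     num1 = 0
--     num2 = 0
--
--     sorted_inputs = sorted(inputs.items(), key=lambda x: x[0], reverse=True)
--     for key, value in sorted_inputs:
--         if key.startswith('x'):
--             num1 = num1 << 1 | value
--         elif key.startswith('y'):
--             num2 = num2 << 1 | value
--     return num1, num2
-- ===== SOURCE B (Python) =====
-- def get_numbers_to_add(inputs):
--     # No sorting: each key's bit is placed directly at its rank (number of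
--     # same-family keys that compare smaller), computed by counting.
--     items = list(inputs.items())
--     num1 = 0
--     num2 = 0
--     for key, value in items:
--         if key.startswith('x'):
--             rank = sum(1 for k2, _ in items if k2.startswith('x') and k2 < key)
--             num1 |= value << rank
--         elif key.startswith('y'):
--             rank = sum(1 for k2, _ in items if k2.startswith('y') and k2 < key)
--             num2 |= value << rank
--     return num1, num2
-- ===== Notes on version B (the rewrite author's own statement) =====
-- stated objective: alternative
-- what changed: Eliminates sorting entirely: instead of reverse-sorting and shift-accumulating (num = num << 1 | value), B makes one pass and, for each key, counts how many same-family keys compare smaller (its rank) and ORs value << rank directly into the result.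
import Mathlib
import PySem

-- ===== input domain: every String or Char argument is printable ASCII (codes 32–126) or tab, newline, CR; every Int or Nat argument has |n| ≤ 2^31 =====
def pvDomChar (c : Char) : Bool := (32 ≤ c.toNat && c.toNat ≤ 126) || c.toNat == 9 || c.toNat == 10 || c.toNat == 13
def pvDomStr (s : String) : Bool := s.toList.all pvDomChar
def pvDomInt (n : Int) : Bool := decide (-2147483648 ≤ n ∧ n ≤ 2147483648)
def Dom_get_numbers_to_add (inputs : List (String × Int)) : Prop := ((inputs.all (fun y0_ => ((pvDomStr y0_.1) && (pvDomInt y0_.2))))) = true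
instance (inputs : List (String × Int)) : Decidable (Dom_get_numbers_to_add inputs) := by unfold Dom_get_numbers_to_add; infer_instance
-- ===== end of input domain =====

-- B drops the sort: one pass that ORs each value at its counted rank (number of smaller same-family keys) — a different algorithm of comparable cost.

-- ===== PORT A =====
def get_numbers_to_add (inputs : List (String × Int)) : Int × Int :=
  let sorted_inputs := PySem.List.sorted inputs (fun x => x.1) true
  sorted_inputs.foldl (fun (nums : Int × Int) kv =>
    if PySem.Str.startswith kv.1 "x" then (PySem.Int.bor (nums.1 <<< (1 : Nat)) kv.2, nums.2)
    else if PySem.Str.startswith kv.1 "y" then (nums.1, PySem.Int.bor (nums.2 <<< (1 : Nat)) kv.2)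
    else nums) ((0 : Int), (0 : Int))

-- ===== PORT B =====
-- rank = sum(1 for k2,_ in items if k2.startswith(..) and k2 < key), ported as the length of the corresponding filter (exact: a 0/1-sum is a count)
def get_numbers_to_add_alt (inputs : List (String × Int)) : Int × Int :=
  inputs.foldl (fun (nums : Int × Int) kv =>
    if PySem.Str.startswith kv.1 "x" then
      let rank := (inputs.filter (fun q => PySem.Str.startswith q.1 "x" && decide (q.1 < kv.1))).length
      (PySem.Int.bor nums.1 ((kv.2 : Int) <<< rank), nums.2)
    else if PySem.Str.startswith kv.1 "y" then
      let rank := (inputs.filter (fun q => PySem.Str.startswith q.1 "y" && decide (q.1 < kv.1))).length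
      (nums.1, PySem.Int.bor nums.2 ((kv.2 : Int) <<< rank))
    else nums) ((0 : Int), (0 : Int))

-- ===== PRECONDITION & SPEC =====
-- Pre_ excludes association lists with a repeated key: those do not represent any Python dict (A's argument
-- is a dict, whose .items() never repeats a key), so A's behaviour on them is not defined by the source.
def Pre_get_numbers_to_add (inputs : List (String × Int)) : Prop := (inputs.map Prod.fst).Nodup
instance (inputs : List (String × Int)) : Decidable (Pre_get_numbers_to_add inputs) := by unfold Pre_get_numbers_to_add; infer_instance
def pvWitness_get_numbers_to_add : (List (String × Int)) := [("x00", 1), ("x01", 0), ("y00", 1)]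
def Spec_get_numbers_to_add (inputs : List (String × Int)) (out : Int × Int) : Prop := out = get_numbers_to_add_alt inputs
instance (inputs : List (String × Int)) (out : Int × Int) : Decidable (Spec_get_numbers_to_add inputs out) := by unfold Spec_get_numbers_to_add; infer_instance

-- ===== CLAIM (what is proved, stated in full; the proofs are below) =====
def Claim_equal_get_numbers_to_add : Prop := ∀ (inputs : List (String × Int)), Dom_get_numbers_to_add inputs → Pre_get_numbers_to_add inputs → Spec_get_numbers_to_add inputs (get_numbers_to_add inputs)

-- ===== LEMMAS AND PROOFS =====

-- ---- Nat bit arithmetic ----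
theorem pvOrAddAnd (a : Nat) : ∀ b : Nat, (a ||| b) + (a &&& b) = a + b := by
  induction a using Nat.binaryRec with
  | zero => intro b; simp
  | bit b' n ih =>
    intro b
    induction b using Nat.binaryRec with
    | zero => simp
    | bit c m _ =>
      rw [Nat.lor_bit, Nat.land_bit, Nat.bit_val, Nat.bit_val, Nat.bit_val, Nat.bit_val]
      have h := ih m
      cases b' <;> cases c <;> simp <;> omega

theorem pvSubAnd (m x : Nat) : m - (m &&& x) = Nat.ldiff m x := by
  have h1 : Nat.ldiff m x ||| (m &&& x) = m := by
    apply Nat.eq_of_testBit_eq; intro i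
    simp only [Nat.testBit_or, Nat.testBit_ldiff, Nat.testBit_and]
    cases m.testBit i <;> cases x.testBit i <;> rfl
  have h2 : Nat.ldiff m x &&& (m &&& x) = 0 := by
    apply Nat.eq_of_testBit_eq; intro i
    simp only [Nat.testBit_and, Nat.testBit_ldiff, Nat.zero_testBit]
    cases m.testBit i <;> cases x.testBit i <;> rfl
  have h3 := pvOrAddAnd (Nat.ldiff m x) (m &&& x)
  rw [h1, h2] at h3
  have h4 : m &&& x ≤ m := Nat.and_le_left
  omega

theorem pvShiftAddOnes (k n : Nat) : n * 2 ^ k + (2 ^ k - 1) = (n <<< k) ||| (2 ^ k - 1) := by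
  have h2 : (n <<< k) &&& (2 ^ k - 1) = 0 := by
    apply Nat.eq_of_testBit_eq; intro i
    simp only [Nat.testBit_and, Nat.testBit_shiftLeft, Nat.testBit_two_pow_sub_one, Nat.zero_testBit]
    by_cases h : k ≤ i
    · simp [h, Nat.not_lt.mpr h]
    · simp [h]
  have h3 := pvOrAddAnd (n <<< k) (2 ^ k - 1)
  rw [h2] at h3
  rw [← Nat.shiftLeft_eq]
  omega

-- two's-complement bit view of an Int
def pvTb (a : Int) (i : Nat) : Bool := if 0 ≤ a then a.toNat.testBit i else !((-a - 1).toNat.testBit i)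

theorem pvTb_bor (a b : Int) (i : Nat) : pvTb (PySem.Int.bor a b) i = (pvTb a i || pvTb b i) := by
  unfold PySem.Int.bor pvTb
  by_cases ha : 0 ≤ a <;> by_cases hb : 0 ≤ b
  · simp [ha, hb, Nat.testBit_or]
  · have hneg : ¬ (0 : Int) ≤ -↑((-b - 1).toNat - ((-b - 1).toNat &&& a.toNat)) - 1 := by
      have := Int.natCast_nonneg ((-b - 1).toNat - ((-b - 1).toNat &&& a.toNat)); omega
    simp only [ha, hb, if_pos, if_neg, hneg, if_true, if_false]
    rw [show (-(-↑((-b - 1).toNat - ((-b - 1).toNat &&& a.toNat)) - 1) - 1 : Int) = ↑((-b - 1).toNat - ((-b - 1).toNat &&& a.toNat)) by ring]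
    rw [Int.toNat_natCast, pvSubAnd, Nat.testBit_ldiff]
    cases (-b - 1).toNat.testBit i <;> cases a.toNat.testBit i <;> rfl
  · have hneg : ¬ (0 : Int) ≤ -↑((-a - 1).toNat - ((-a - 1).toNat &&& b.toNat)) - 1 := by
      have := Int.natCast_nonneg ((-a - 1).toNat - ((-a - 1).toNat &&& b.toNat)); omega
    simp only [ha, hb, if_pos, if_neg, hneg, if_true, if_false]
    rw [show (-(-↑((-a - 1).toNat - ((-a - 1).toNat &&& b.toNat)) - 1) - 1 : Int) = ↑((-a - 1).toNat - ((-a - 1).toNat &&& b.toNat)) by ring]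
    rw [Int.toNat_natCast, pvSubAnd, Nat.testBit_ldiff]
    cases (-a - 1).toNat.testBit i <;> cases b.toNat.testBit i <;> rfl
  · have hneg : ¬ (0 : Int) ≤ -↑((-a - 1).toNat &&& (-b - 1).toNat) - 1 := by
      have := Int.natCast_nonneg ((-a - 1).toNat &&& (-b - 1).toNat); omega
    simp only [ha, hb, if_neg, hneg, if_false]
    rw [show (-(-↑((-a - 1).toNat &&& (-b - 1).toNat) - 1) - 1 : Int) = ↑((-a - 1).toNat &&& (-b - 1).toNat) by ring]
    rw [Int.toNat_natCast, Nat.testBit_and]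
    cases (-a - 1).toNat.testBit i <;> cases (-b - 1).toNat.testBit i <;> rfl

theorem pvTb_inj {a b : Int} (h : ∀ i, pvTb a i = pvTb b i) : a = b := by
  unfold pvTb at h
  by_cases ha : 0 ≤ a <;> by_cases hb : 0 ≤ b
  · have : a.toNat = b.toNat := by
      apply Nat.eq_of_testBit_eq; intro i; have := h i; simpa [ha, hb] using this
    omega
  · exfalso
    set i := a.toNat + (-b - 1).toNat with hi
    have h1 : a.toNat < 2 ^ i := lt_of_lt_of_le (Nat.lt_two_pow_self) (Nat.pow_le_pow_right (by norm_num) (by omega))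
    have h2 : (-b - 1).toNat < 2 ^ i := lt_of_lt_of_le (Nat.lt_two_pow_self) (Nat.pow_le_pow_right (by norm_num) (by omega))
    have hthis := h i
    rw [if_pos ha, if_neg hb, Nat.testBit_eq_false_of_lt h1, Nat.testBit_eq_false_of_lt h2] at hthis
    simp at hthis
  · exfalso
    set i := b.toNat + (-a - 1).toNat with hi
    have h1 : b.toNat < 2 ^ i := lt_of_lt_of_le (Nat.lt_two_pow_self) (Nat.pow_le_pow_right (by norm_num) (by omega))
    have h2 : (-a - 1).toNat < 2 ^ i := lt_of_lt_of_le (Nat.lt_two_pow_self) (Nat.pow_le_pow_right (by norm_num) (by omega))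
    have hthis := h i
    rw [if_neg ha, if_pos hb, Nat.testBit_eq_false_of_lt h1, Nat.testBit_eq_false_of_lt h2] at hthis
    simp at hthis
  · have : (-a - 1).toNat = (-b - 1).toNat := by
      apply Nat.eq_of_testBit_eq; intro i; have := h i
      simp only [ha, hb, if_false, Bool.not_inj_iff] at this; exact this
    omega

theorem pvTb_shl (a : Int) (k i : Nat) : pvTb (a <<< k) i = (decide (k ≤ i) && pvTb a (i - k)) := by
  by_cases ha : 0 ≤ a
  · obtain ⟨n, rfl⟩ := Int.eq_ofNat_of_zero_le ha
    have hc : ((n : Int)) <<< k = ((n <<< k : Nat) : Int) := by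
      rw [Int.shiftLeft_eq, Nat.shiftLeft_eq]; push_cast; ring
    rw [hc]
    unfold pvTb
    simp only [Int.natCast_nonneg, if_pos, Int.toNat_natCast]
    rw [Nat.testBit_shiftLeft]
  · have hm : 0 ≤ -a - 1 := by omega
    set m := (-a - 1).toNat with hmdef
    have ham : a = -(m : Int) - 1 := by omega
    have hone : (1 : Nat) ≤ 2 ^ k := Nat.one_le_two_pow
    have hc : a <<< k = -((m * 2 ^ k + (2 ^ k - 1) : Nat) : Int) - 1 := by
      rw [Int.shiftLeft_eq, ham]
      push_cast [hone]
      ring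
    rw [hc]
    unfold pvTb
    have hneg : ¬ (0 : Int) ≤ -((m * 2 ^ k + (2 ^ k - 1) : Nat) : Int) - 1 := by
      have := Int.natCast_nonneg (m * 2 ^ k + (2 ^ k - 1)); omega
    simp only [hneg, if_false, if_neg ha]
    rw [show (-(-((m * 2 ^ k + (2 ^ k - 1) : Nat) : Int) - 1) - 1) = ((m * 2 ^ k + (2 ^ k - 1) : Nat) : Int) by ring]
    rw [Int.toNat_natCast, pvShiftAddOnes, Nat.testBit_or, Nat.testBit_shiftLeft, Nat.testBit_two_pow_sub_one, ← hmdef]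
    by_cases hik : k ≤ i
    · simp [hik, ge_iff_le, Nat.not_lt.mpr hik]
    · simp [hik, ge_iff_le, Nat.lt_of_not_le hik]

theorem pvBorAssoc (a b c : Int) : PySem.Int.bor (PySem.Int.bor a b) c = PySem.Int.bor a (PySem.Int.bor b c) :=
  pvTb_inj fun i => by simp [pvTb_bor, Bool.or_assoc]

theorem pvShlBor (a b : Int) (k : Nat) : (PySem.Int.bor a b) <<< k = PySem.Int.bor (a <<< k) (b <<< k) :=
  pvTb_inj fun i => by simp [pvTb_shl, pvTb_bor, Bool.and_or_distrib_left]

theorem pvShlShl (a : Int) (m n : Nat) : (a <<< m) <<< n = a <<< (m + n) := by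
  simp only [Int.shiftLeft_eq, pow_add]; ring

theorem pvShlZero (a : Int) : a <<< (0 : Nat) = a := by simp [Int.shiftLeft_eq]

theorem pvZeroShl (k : Nat) : (0 : Int) <<< k = 0 := by simp [Int.shiftLeft_eq]

theorem pvBorZeroLeft (a : Int) : PySem.Int.bor 0 a = a := by
  rw [PySem.Int.bor_comm, PySem.Int.bor_zero]

-- ---- A-side fold characterisation ----
def pvFA (a : Int) (l : List Int) : Int := l.foldl (fun acc v => PySem.Int.bor (acc <<< (1 : Nat)) v) a

def pvS : List Int → Nat → Int
  | [], _ => 0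
  | v :: t, i => PySem.Int.bor (v <<< i) (pvS t (i + 1))

theorem pvFA_rev (l : List Int) : ∀ (a : Int) (i : Nat),
    (pvFA a l.reverse) <<< i = PySem.Int.bor (a <<< (l.length + i)) (pvS l i) := by
  induction l with
  | nil => intro a i; simp [pvFA, pvS, PySem.Int.bor_zero]
  | cons u t ih =>
    intro a i
    have hfa : pvFA a (u :: t).reverse = PySem.Int.bor ((pvFA a t.reverse) <<< (1 : Nat)) u := by
      simp [pvFA, List.foldl_append]
    rw [hfa, pvShlBor, pvShlShl]
    rw [show (1 + i) = i + 1 by omega, ih a (i + 1)]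
    rw [pvBorAssoc, PySem.Int.bor_comm (pvS t (i + 1)) (u <<< i)]
    rw [show t.length + (i + 1) = (u :: t).length + i by simp; omega]
    rfl

theorem pvFA_rev0 (l : List Int) : pvFA 0 l.reverse = pvS l 0 := by
  have h := pvFA_rev l 0 0
  rw [pvShlZero, pvZeroShl, pvBorZeroLeft] at h
  exact h

-- ---- predicates ----
def pvPx (kv : String × Int) : Bool := PySem.Str.startswith kv.1 "x"
def pvPy (kv : String × Int) : Bool := !(pvPx kv) && PySem.Str.startswith kv.1 "y"
def pvPy0 (kv : String × Int) : Bool := PySem.Str.startswith kv.1 "y"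

-- a key cannot start with both 'x' and 'y', so the elif guard equals plain startswith('y')
theorem pvXY (s : String) : PySem.Str.startswith s "y" = true → PySem.Str.startswith s "x" = false := by
  simp only [PySem.Str.startswith_eq]
  intro hy
  rcases (PySem.Chars.startswith_iff _ _).mp hy with ⟨t, ht⟩
  by_contra hc
  rcases (PySem.Chars.startswith_iff _ _).mp (Bool.of_not_eq_false hc) with ⟨t', ht'⟩
  rw [← ht] at ht'
  simp at ht'

theorem pvPyEq : pvPy = pvPy0 := by
  funext kv
  unfold pvPy pvPy0 pvPx
  by_cases hy : PySem.Str.startswith kv.1 "y"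
  · rw [hy, pvXY kv.1 hy]; rfl
  · rw [Bool.of_not_eq_true hy, Bool.and_false]

-- ---- A's fold split (by branch) ----
theorem pvAFold (l : List (String × Int)) : ∀ n1 n2 : Int,
    l.foldl (fun (nums : Int × Int) kv =>
      if PySem.Str.startswith kv.1 "x" then (PySem.Int.bor (nums.1 <<< (1 : Nat)) kv.2, nums.2)
      else if PySem.Str.startswith kv.1 "y" then (nums.1, PySem.Int.bor (nums.2 <<< (1 : Nat)) kv.2)
      else nums) (n1, n2)
    = (pvFA n1 ((l.filter pvPx).map Prod.snd), pvFA n2 ((l.filter pvPy).map Prod.snd)) := by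
  induction l with
  | nil => intro n1 n2; simp [pvFA]
  | cons kv t ih =>
    intro n1 n2
    by_cases hx : PySem.Str.startswith kv.1 "x"
    · simp only [List.foldl_cons, if_pos hx, List.filter_cons, pvPx, pvPy, hx]
      simp only [Bool.not_true, Bool.false_and, if_pos, if_neg, Bool.false_eq_true, not_false_eq_true]
      rw [ih]
      simp [pvFA, pvPx, pvPy]
    · by_cases hy : PySem.Str.startswith kv.1 "y"
      · simp only [List.foldl_cons, if_neg hx, if_pos hy, List.filter_cons, pvPx, pvPy, hx, hy]
        simp only [Bool.not_false, Bool.true_and]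
        rw [ih]
        simp [pvFA, pvPx, pvPy, hx]
      · simp only [List.foldl_cons, if_neg hx, if_neg hy, List.filter_cons, pvPx, pvPy, hx, hy]
        simp only [Bool.not_false, Bool.true_and]
        rw [ih]
        simp [pvPx, pvPy, hx, hy]

-- ---- B's fold split (by branch); the rank functions are fixed parameters ----
def pvFB (r : String × Int → Nat) (acc : Int) (l : List (String × Int)) : Int :=
  l.foldl (fun num kv => PySem.Int.bor num (kv.2 <<< r kv)) acc

theorem pvBFold (rx ry : String × Int → Nat) (l : List (String × Int)) : ∀ n1 n2 : Int,
    l.foldl (fun (nums : Int × Int) kv =>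
      if PySem.Str.startswith kv.1 "x" then (PySem.Int.bor nums.1 (kv.2 <<< rx kv), nums.2)
      else if PySem.Str.startswith kv.1 "y" then (nums.1, PySem.Int.bor nums.2 (kv.2 <<< ry kv))
      else nums) (n1, n2)
    = (pvFB rx n1 (l.filter pvPx), pvFB ry n2 (l.filter pvPy)) := by
  induction l with
  | nil => intro n1 n2; simp [pvFB]
  | cons kv t ih =>
    intro n1 n2
    by_cases hx : PySem.Str.startswith kv.1 "x"
    · simp only [List.foldl_cons, if_pos hx, List.filter_cons, pvPx, pvPy, hx]
      simp only [Bool.not_true, Bool.false_and, if_pos, if_neg, Bool.false_eq_true, not_false_eq_true]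
      rw [ih]
      simp [pvFB, pvPx, pvPy]
    · by_cases hy : PySem.Str.startswith kv.1 "y"
      · simp only [List.foldl_cons, if_neg hx, if_pos hy, List.filter_cons, pvPx, pvPy, hx, hy]
        simp only [Bool.not_false, Bool.true_and]
        rw [ih]
        simp [pvFB, pvPx, pvPy, hx]
      · simp only [List.foldl_cons, if_neg hx, if_neg hy, List.filter_cons, pvPx, pvPy, hx, hy]
        simp only [Bool.not_false, Bool.true_and]
        rw [ih]
        simp [pvPx, pvPy, hx, hy]

-- OR-folds are invariant under permutation of the list
theorem pvFB_perm (r : String × Int → Nat) (acc : Int) {l l' : List (String × Int)} (h : l.Perm l') :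
    pvFB r acc l = pvFB r acc l' := by
  unfold pvFB
  exact h.foldl_eq' (fun a _ b _ z => by rw [pvBorAssoc, pvBorAssoc, PySem.Int.bor_comm (a.2 <<< r a)]) acc

-- a fold that places each element at rank base+index is exactly pvS
theorem pvFoldRank : ∀ (s : List (String × Int)) (r : String × Int → Nat) (b : Nat) (acc : Int),
    (∀ i (h : i < s.length), r s[i] = b + i) →
    pvFB r acc s = PySem.Int.bor acc (pvS (s.map Prod.snd) b) := by
  intro s
  induction s with
  | nil => intro r b acc _; simp [pvFB, pvS, PySem.Int.bor_zero]
  | cons a t ih =>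
    intro r b acc hr
    have ha : r a = b := by simpa using hr 0 (by simp)
    have ht : ∀ i (h : i < t.length), r t[i] = (b + 1) + i := by
      intro i h
      have := hr (i + 1) (by simp; omega)
      simpa [Nat.add_assoc, Nat.add_comm 1 i] using this
    show pvFB r (PySem.Int.bor acc (a.2 <<< r a)) t = _
    rw [ih r (b + 1) _ ht, ha, pvBorAssoc]
    rfl

-- in a strictly key-ascending list, the number of smaller keys is the position
theorem pvRankIdx (u v : List (String × Int)) (x : String × Int)
    (hp : (u ++ x :: v).Pairwise (fun a b => a.1 < b.1)) :
    (u ++ x :: v).countP (fun q => decide (q.1 < x.1)) = u.length := by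
  rcases List.pairwise_append.mp hp with ⟨hu, hxv, huv⟩
  rw [List.countP_append, List.countP_cons]
  have h1 : u.countP (fun q => decide (q.1 < x.1)) = u.length :=
    List.countP_eq_length.mpr (fun q hq => by
      simp only [decide_eq_true_eq]; exact huv q hq x (by simp))
  have h2 : v.countP (fun q => decide (q.1 < x.1)) = 0 :=
    List.countP_eq_zero.mpr (fun q hq => by
      simp only [decide_eq_true_eq]
      exact not_lt_of_gt ((List.pairwise_cons.mp hxv).1 q hq))
  have h3 : ¬ (decide (x.1 < x.1) = true) := by simp
  rw [h1, h2, if_neg h3]; omega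

-- strictness from nodup keys
theorem pvStrictDesc {l : List (String × Int)} (hnd : (l.map Prod.fst).Nodup)
    (hp : l.Pairwise (fun a b => b.1 ≤ a.1)) : l.Pairwise (fun a b => b.1 < a.1) := by
  have hne : l.Pairwise (fun a b => a.1 ≠ b.1) := List.pairwise_map.mp hnd
  exact (hp.and hne).imp (fun h => lt_of_le_of_ne h.1 (Ne.symm h.2))

theorem pvStrictAsc {l : List (String × Int)} (hnd : (l.map Prod.fst).Nodup)
    (hp : l.Pairwise (fun a b => a.1 ≤ b.1)) : l.Pairwise (fun a b => a.1 < b.1) := by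
  have hne : l.Pairwise (fun a b => a.1 ≠ b.1) := List.pairwise_map.mp hnd
  exact (hp.and hne).imp (fun h => lt_of_le_of_ne h.1 h.2)

-- A-side: filtering the descending sort equals the reverse of the ascending sort of the filter
theorem pvFilterSorted (p : (String × Int) → Bool) {inputs : List (String × Int)}
    (hnd : (inputs.map Prod.fst).Nodup) :
    List.filter p (PySem.List.sorted inputs (fun q => q.1) true)
      = (PySem.List.sorted (inputs.filter p) (fun q => q.1) false).reverse := by
  have hndSorted : ((PySem.List.sorted inputs (fun q => q.1) true).map Prod.fst).Nodup :=
    ((PySem.List.sorted_perm inputs (fun q => q.1) true).map Prod.fst).nodup_iff.mpr hnd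
  have hndFiltSorted : ((List.filter p (PySem.List.sorted inputs (fun q => q.1) true)).map Prod.fst).Nodup :=
    hndSorted.sublist (List.filter_sublist.map Prod.fst)
  have hndFilt : ((inputs.filter p).map Prod.fst).Nodup :=
    hnd.sublist (List.filter_sublist.map Prod.fst)
  have hperm1 : (List.filter p (PySem.List.sorted inputs (fun q => q.1) true)).Perm (inputs.filter p) :=
    (PySem.List.sorted_perm inputs (fun q => q.1) true).filter p
  have hpw1 : (List.filter p (PySem.List.sorted inputs (fun q => q.1) true)).Pairwise (fun a b => b.1 < a.1) :=
    pvStrictDesc hndFiltSorted ((PySem.List.sorted_pairwise_rev inputs (fun q => q.1)).filter p)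
  have h1 := PySem.List.sorted_rev_eq_of_perm_of_pairwise_gt (inputs.filter p) _ (fun q => q.1) hperm1 hpw1
  have hperm2 : ((PySem.List.sorted (inputs.filter p) (fun q => q.1) false).reverse).Perm (inputs.filter p) :=
    (List.reverse_perm _).trans (PySem.List.sorted_perm (inputs.filter p) (fun q => q.1) false)
  have hpw2 : ((PySem.List.sorted (inputs.filter p) (fun q => q.1) false).reverse).Pairwise (fun a b => b.1 < a.1) := by
    rw [List.pairwise_reverse]
    have hndAsc : ((PySem.List.sorted (inputs.filter p) (fun q => q.1) false).map Prod.fst).Nodup :=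
      ((PySem.List.sorted_perm (inputs.filter p) (fun q => q.1) false).map Prod.fst).nodup_iff.mpr hndFilt
    exact pvStrictAsc hndAsc (PySem.List.sorted_pairwise (inputs.filter p) (fun q => q.1))
  have h2 := PySem.List.sorted_rev_eq_of_perm_of_pairwise_gt (inputs.filter p) _ (fun q => q.1) hperm2 hpw2
  exact h1.symm.trans h2

-- B-side for one family: counted-rank fold over the unsorted filter equals pvS of the sorted filter
theorem pvBSide (p : (String × Int) → Bool) {inputs : List (String × Int)}
    (hnd : (inputs.map Prod.fst).Nodup) :
    pvFB (fun kv => (inputs.filter (fun q => p q && decide (q.1 < kv.1))).length) 0 (inputs.filter p)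
      = pvS ((PySem.List.sorted (inputs.filter p) (fun q => q.1) false).map Prod.snd) 0 := by
  set s := PySem.List.sorted (inputs.filter p) (fun q => q.1) false with hs
  have hperm : (inputs.filter p).Perm s := (PySem.List.sorted_perm (inputs.filter p) (fun q => q.1) false).symm
  have hndFilt : ((inputs.filter p).map Prod.fst).Nodup :=
    hnd.sublist (List.filter_sublist.map Prod.fst)
  have hndS : (s.map Prod.fst).Nodup := ((hperm.map Prod.fst).nodup_iff).mp hndFilt
  have hAsc : s.Pairwise (fun a b => a.1 < b.1) :=
    pvStrictAsc hndS (PySem.List.sorted_pairwise (inputs.filter p) (fun q => q.1))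
  rw [pvFB_perm _ _ hperm]
  rw [pvFoldRank s _ 0 0 ?_, pvBorZeroLeft]
  intro i h
  have hcomm : (fun q => p q && decide (q.1 < s[i].1))
      = (fun q : String × Int => decide (q.1 < s[i].1) && p q) :=
    funext (fun q => Bool.and_comm _ _)
  rw [← List.countP_eq_length_filter, hcomm, ← List.countP_filter, hperm.countP_eq]
  have hsplit : s = s.take i ++ s[i] :: s.drop (i + 1) := by
    conv_lhs => rw [← List.take_append_drop i s]
    rw [List.drop_eq_getElem_cons h]
  have hlen : (s.take i).length = i := by
    rw [List.length_take]; omega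
  calc s.countP (fun q => decide (q.1 < s[i].1))
      = (s.take i ++ s[i] :: s.drop (i + 1)).countP (fun q => decide (q.1 < s[i].1)) := by rw [← hsplit]
    _ = (s.take i).length := pvRankIdx _ _ _ (hsplit ▸ hAsc)
    _ = 0 + i := by omega

-- ===== VERDICT (by name: the statement is the Claim_ definition above) =====
theorem get_numbers_to_add_spec : Claim_equal_get_numbers_to_add := by
  intro inputs _hdom hpre
  unfold Spec_get_numbers_to_add
  unfold Pre_get_numbers_to_add at hpre
  show get_numbers_to_add inputs = get_numbers_to_add_alt inputs
  simp only [get_numbers_to_add, get_numbers_to_add_alt]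
  rw [pvAFold, pvBFold]
  rw [pvFilterSorted pvPx hpre, pvFilterSorted pvPy hpre]
  rw [List.map_reverse, List.map_reverse, pvFA_rev0, pvFA_rev0]
  have hx := pvBSide pvPx hpre
  have hy := pvBSide pvPy0 hpre
  rw [pvPyEq]
  exact Prod.ext (hx.symm) (hy.symm)
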